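-- pv_equiv track=rewrite | github.com/PauloPSAS/Exercicios-de-Python | Python-org/EstruturaDeRepeticao/exe0040.py | menor_indice_acidentes
-- ===== SOURCE A (Python) =====
-- def menor_indice_acidentes(c):
--     index = 1
--     menor = maior = 0
--     cidadeMenInd = cidadeMaiInd = ''
--     for cidade in c:
--         if index == 1:
--             menor = c[cidade]['acidentes']
--             cidadeMenInd = cidade
--             maior = c[cidade]['acidentes']
--             cidadeMaiInd = cidade
--         else:
--             if c[cidade]['acidentes'] < menor:
--                 menor = c[cidade]['acidentes']
--                 cidadeMenInd = cidade
--             if c[cidade]['acidentes'] > maior: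
--                 maior = c[cidade]['acidentes']
--                 cidadeMaiInd = cidade
--         index += 1
--     return maior, cidadeMaiInd, menor, cidadeMenInd
-- ===== SOURCE B (Python) =====
-- def menor_indice_acidentes(c):
--     if not c:
--         return (0, '', 0, '')
--     acc = lambda k: c[k]['acidentes']
--     cidadeMaiInd = max(c, key=acc)
--     cidadeMenInd = min(c, key=acc)
--     return (acc(cidadeMaiInd), cidadeMaiInd, acc(cidadeMenInd), cidadeMenInd)
-- ===== Notes on version B (the rewrite author's own statement) =====
-- stated objective: idiomatic
-- what changed: replaces the fused index-tracking loop that threads four accumulators with two keyed max()/min() library passes over the keys (first extremal key on ties, as in A)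
import Mathlib
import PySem

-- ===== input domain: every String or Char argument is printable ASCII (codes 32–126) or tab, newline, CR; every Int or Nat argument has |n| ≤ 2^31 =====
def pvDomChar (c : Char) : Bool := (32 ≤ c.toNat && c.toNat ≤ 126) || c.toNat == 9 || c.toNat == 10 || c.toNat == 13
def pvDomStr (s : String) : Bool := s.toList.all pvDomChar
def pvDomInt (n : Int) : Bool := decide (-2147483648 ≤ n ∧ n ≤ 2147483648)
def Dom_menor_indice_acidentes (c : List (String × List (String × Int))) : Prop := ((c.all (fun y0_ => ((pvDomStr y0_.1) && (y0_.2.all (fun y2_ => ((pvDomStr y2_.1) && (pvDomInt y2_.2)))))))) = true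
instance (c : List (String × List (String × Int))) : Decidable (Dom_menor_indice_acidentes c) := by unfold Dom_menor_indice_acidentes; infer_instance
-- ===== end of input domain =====

-- B replaces A's fused index-tracking scan with two keyed max/min passes over the keys (idiomatic; same cost).


-- c[cidade]['acidentes']: dict lookup (first match); the default 0 is never reached under Pre_ (key present)
def pvLook (c : List (String × List (String × Int))) (cidade : String) : Int :=
  (PySem.Dict.mk ((PySem.Dict.mk c).getD cidade [])).getD "acidentes" 0

-- ===== PORT A =====
def menor_indice_acidentes (c : List (String × List (String × Int))) : Int × String × Int × String :=
  -- state: (index, menor, maior, cidadeMenInd, cidadeMaiInd)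
  let st := c.foldl (fun (st : Int × Int × Int × String × String) kv =>
    let cidade := kv.1
    if st.1 == 1 then
      (st.1 + 1, pvLook c cidade, pvLook c cidade, cidade, cidade)
    else
      let stMen := if pvLook c cidade < st.2.1 then (pvLook c cidade, cidade) else (st.2.1, st.2.2.2.1)
      let stMai := if pvLook c cidade > st.2.2.1 then (pvLook c cidade, cidade) else (st.2.2.1, st.2.2.2.2)
      (st.1 + 1, stMen.1, stMai.1, stMen.2, stMai.2))
    (1, 0, 0, "", "")
  (st.2.2.1, st.2.2.2.2, st.2.1, st.2.2.2.1)

-- ===== PORT B =====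
def menor_indice_acidentes_alt (c : List (String × List (String × Int))) : Int × String × Int × String :=
  match PySem.List.max? (c.map Prod.fst) (fun k => pvLook c k),
        PySem.List.min? (c.map Prod.fst) (fun k => pvLook c k) with
  | some cidadeMaiInd, some cidadeMenInd =>
      (pvLook c cidadeMaiInd, cidadeMaiInd, pvLook c cidadeMenInd, cidadeMenInd)
  | _, _ => (0, "", 0, "")

-- ===== PRECONDITION & SPEC =====
-- Pre_ excludes exactly the inputs where some inner dict lacks the key 'acidentes', on which Python A raises KeyError.
def Pre_menor_indice_acidentes (c : List (String × List (String × Int))) : Prop :=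
  (c.all (fun p => (p.2.map Prod.fst).contains "acidentes")) = true
instance (c : List (String × List (String × Int))) : Decidable (Pre_menor_indice_acidentes c) := by unfold Pre_menor_indice_acidentes; infer_instance

def pvWitness_menor_indice_acidentes : (List (String × List (String × Int))) :=
  [("Recife", [("acidentes", 3)]), ("Olinda", [("acidentes", 7)])]

def Spec_menor_indice_acidentes (c : List (String × List (String × Int))) (out : Int × String × Int × String) : Prop := out = menor_indice_acidentes_alt c
instance (c : List (String × List (String × Int))) (out : Int × String × Int × String) : Decidable (Spec_menor_indice_acidentes c out) := by unfold Spec_menor_indice_acidentes; infer_instance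

-- ===== CLAIM (what is proved, stated in full; the proofs are below) =====
def Claim_equal_menor_indice_acidentes : Prop := ∀ (c : List (String × List (String × Int))), Dom_menor_indice_acidentes c → Pre_menor_indice_acidentes c → Spec_menor_indice_acidentes c (menor_indice_acidentes c)

-- ===== LEMMAS AND PROOFS =====

-- the (value, name) selection step A's loop performs after the first element
def selMin (f : String → Int) (st : Int × String) (k : String) : Int × String :=
  if f k < st.1 then (f k, k) else st
def selMax (f : String → Int) (st : Int × String) (k : String) : Int × String :=
  if st.1 < f k then (f k, k) else st

-- the name-only selection steps B's max?/min? perform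
def pickMin (f : String → Int) (k k' : String) : String := if f k' < f k then k' else k
def pickMax (f : String → Int) (k k' : String) : String := if f k < f k' then k' else k

theorem loopA_eq (c : List (String × List (String × Int)))
    (t : List (String × List (String × Int))) :
    ∀ (idx men mai : Int) (cMen cMai : String), 2 ≤ idx →
    t.foldl (fun (st : Int × Int × Int × String × String) kv =>
      if st.1 = 1 then (st.1 + 1, pvLook c kv.1, pvLook c kv.1, kv.1, kv.1)
      else
        (st.1 + 1,
          (if pvLook c kv.1 < st.2.1 then (pvLook c kv.1, kv.1) else (st.2.1, st.2.2.2.1)).1,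
          (if st.2.2.1 < pvLook c kv.1 then (pvLook c kv.1, kv.1) else (st.2.2.1, st.2.2.2.2)).1,
          (if pvLook c kv.1 < st.2.1 then (pvLook c kv.1, kv.1) else (st.2.1, st.2.2.2.1)).2,
          (if st.2.2.1 < pvLook c kv.1 then (pvLook c kv.1, kv.1) else (st.2.2.1, st.2.2.2.2)).2))
      (idx, men, mai, cMen, cMai)
    = (idx + t.length,
       (t.foldl (fun s p => selMin (pvLook c) s p.1) (men, cMen)).1,
       (t.foldl (fun s p => selMax (pvLook c) s p.1) (mai, cMai)).1,
       (t.foldl (fun s p => selMin (pvLook c) s p.1) (men, cMen)).2,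
       (t.foldl (fun s p => selMax (pvLook c) s p.1) (mai, cMai)).2) := by
  induction t with
  | nil => intro idx men mai cMen cMai h; simp
  | cons p t ih =>
    intro idx men mai cMen cMai h
    simp only [List.foldl_cons, selMin, selMax]
    split_ifs <;>
      first
        | (exfalso; omega)
        | (rw [ih _ _ _ _ _ (by omega)]
           simp only [Prod.mk.injEq]
           refine ⟨by simp only [List.length_cons, Nat.cast_add, Nat.cast_one]; omega, rfl, rfl, rfl, rfl⟩)

theorem selMin_fold (f : String → Int) (t : List (String × List (String × Int))) :
    ∀ (k0 : String),
    t.foldl (fun s p => selMin f s p.1) (f k0, k0)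
      = (f (t.foldl (fun k p => pickMin f k p.1) k0), t.foldl (fun k p => pickMin f k p.1) k0) := by
  induction t with
  | nil => intro k0; rfl
  | cons p t ih =>
    intro k0
    simp only [List.foldl_cons, selMin, pickMin]
    split_ifs <;> exact ih _

theorem selMax_fold (f : String → Int) (t : List (String × List (String × Int))) :
    ∀ (k0 : String),
    t.foldl (fun s p => selMax f s p.1) (f k0, k0)
      = (f (t.foldl (fun k p => pickMax f k p.1) k0), t.foldl (fun k p => pickMax f k p.1) k0) := by
  induction t with
  | nil => intro k0; rfl
  | cons p t ih =>
    intro k0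
    simp only [List.foldl_cons, selMax, pickMax]
    split_ifs <;> exact ih _

theorem min?_cons_eq (f : String → Int) (t : List String) :
    ∀ (x : String), PySem.List.min? (x :: t) f = some (t.foldl (pickMin f) x) := by
  induction t with
  | nil => intro x; rfl
  | cons y t ih =>
    intro x
    have step : PySem.List.min? (x :: y :: t) f = PySem.List.min? ((if f y < f x then y else x) :: t) f := by
      simp only [PySem.List.min?, List.foldl_cons]
      split_ifs <;> rfl
    rw [step, ih]
    simp only [List.foldl_cons, pickMin]

theorem max?_cons_eq (f : String → Int) (t : List String) :
    ∀ (x : String), PySem.List.max? (x :: t) f = some (t.foldl (pickMax f) x) := by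
  induction t with
  | nil => intro x; rfl
  | cons y t ih =>
    intro x
    have step : PySem.List.max? (x :: y :: t) f = PySem.List.max? ((if f x < f y then y else x) :: t) f := by
      simp only [PySem.List.max?, List.foldl_cons]
      split_ifs <;> rfl
    rw [step, ih]
    simp only [List.foldl_cons, pickMax]

-- ===== VERDICT (by name: the statement is the Claim_ definition above) =====
theorem menor_indice_acidentes_spec : Claim_equal_menor_indice_acidentes := by
  intro c _ _
  unfold Spec_menor_indice_acidentes
  cases c with
  | nil => rfl
  | cons p t =>
    unfold menor_indice_acidentes menor_indice_acidentes_alt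
    simp only [List.foldl_cons]
    norm_num
    rw [loopA_eq (p :: t) t 2 (pvLook (p :: t) p.1) (pvLook (p :: t) p.1) p.1 p.1 (by omega),
        selMin_fold (pvLook (p :: t)) t p.1, selMax_fold (pvLook (p :: t)) t p.1]
    simp only [
        min?_cons_eq (fun k => pvLook (p :: t) k) (t.map Prod.fst) p.1,
        max?_cons_eq (fun k => pvLook (p :: t) k) (t.map Prod.fst) p.1,
        List.foldl_map]
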